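-- pv_equiv track=rewrite | github.com/AdenLe-Github/tccasheduling | sandbox.py | generate_time_ranges
-- ===== SOURCE A (Python) =====
-- def generate_time_ranges(time_slots):
--     """
--     Generates time ranges in the format "9:00 AM - 9:15 AM" from a list of military time slots.
--     """
--     regular_times = timeframecreatorstorageregular(time_slots)
--     time_ranges = []
--
--     for i in range(len(regular_times) - 1):
--         start_time = regular_times[i]
--         end_time = regular_times[i + 1]
--         time_ranges.append(f"{start_time} - {end_time}")
--
--     return time_ranges
--
-- def timeframecreatorstorageregular(time_slots):
--     """
--     Converts a list of military time slots to regular time format.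
--     """
--     regular_times = []
--
--     for time in time_slots:
--         hours = time // 100
--         minutes = time % 100
--
--         if hours < 12:
--             period = "AM"
--             formatted_time = f"{hours}:{minutes:02d} {period}"
--         else:
--             period = "PM"
--             formatted_time = f"{hours - 12 if hours > 12 else 12}:{minutes:02d} {period}"
--
--         regular_times.append(formatted_time)
--
--     return regular_times
-- ===== SOURCE B (Python) =====
-- def generate_time_ranges(time_slots):
--     """
--     Generates time ranges in the format "9:00 AM - 9:15 AM" from a list of
--     military time slots, in one streaming pass: each slot is formatted inline
--     and paired with the previously formatted time.
--     """
--     time_ranges = []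
--     prev = None
--     for time in time_slots:
--         hours = time // 100
--         minutes = time % 100
--         if hours < 12:
--             current = f"{hours}:{minutes:02d} AM"
--         else:
--             current = f"{hours - 12 if hours > 12 else 12}:{minutes:02d} PM"
--         if prev is not None:
--             time_ranges.append(f"{prev} - {current}")
--         prev = current
--     return time_ranges
-- ===== Notes on version B (the rewrite author's own statement) =====
-- stated objective: simpler
-- what changed: Replaces the two-pass structure (build the full formatted list, then an index-based loop pairing regular_times[i] with regular_times[i+1]) by a single streaming pass that formats each slot inline and keeps only the previously formatted string as state.
import Mathlib
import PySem

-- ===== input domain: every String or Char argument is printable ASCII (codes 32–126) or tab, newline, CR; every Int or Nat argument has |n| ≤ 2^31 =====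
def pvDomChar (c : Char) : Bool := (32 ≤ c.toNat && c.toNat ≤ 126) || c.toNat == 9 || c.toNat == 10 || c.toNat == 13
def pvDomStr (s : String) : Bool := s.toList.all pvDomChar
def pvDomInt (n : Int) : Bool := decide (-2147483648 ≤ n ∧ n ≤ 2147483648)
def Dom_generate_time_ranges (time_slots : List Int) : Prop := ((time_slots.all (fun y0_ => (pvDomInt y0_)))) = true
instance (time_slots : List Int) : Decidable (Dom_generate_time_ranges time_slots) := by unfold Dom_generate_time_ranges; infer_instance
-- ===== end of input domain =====

-- B replaces A's two passes (format all slots, then pair by index) with one streaming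
-- pass keeping only the previously formatted string as state (objective: simpler).

-- Python f"{m:02d}": exact for 0 ≤ m ≤ 99, the only values reached (m = time % 100 ∈ [0,100))
def pvPad2 (m : Int) : String :=
  if m < 10 then "0" ++ PySem.Int.toStr m else PySem.Int.toStr m

-- ===== PORT A =====
def timeframecreatorstorageregular (time_slots : List Int) : List String :=
  time_slots.foldl (fun regular_times time =>
    let hours := PySem.Int.floordiv time 100
    let minutes := PySem.Int.mod time 100
    let formatted_time :=
      if hours < 12 then
        PySem.Int.toStr hours ++ ":" ++ pvPad2 minutes ++ " AM"
      else
        PySem.Int.toStr (if hours > 12 then hours - 12 else 12) ++ ":" ++ pvPad2 minutes ++ " PM"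
    regular_times ++ [formatted_time]) []

def generate_time_ranges (time_slots : List Int) : List String :=
  let regular_times := timeframecreatorstorageregular time_slots
  (PySem.List.pyRange 0 ((regular_times.length : Int) - 1) 1).foldl
    (fun time_ranges i =>
      -- regular_times[i] / regular_times[i+1]: i is always in range here
      let start_time := PySem.List.pyGetD regular_times i ""
      let end_time := PySem.List.pyGetD regular_times (i + 1) ""
      time_ranges ++ [start_time ++ " - " ++ end_time]) []

-- ===== PORT B =====
def generate_time_ranges_alt (time_slots : List Int) : List String :=
  (time_slots.foldl (fun (st : Option String × List String) time =>
      let hours := PySem.Int.floordiv time 100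
      let minutes := PySem.Int.mod time 100
      let current :=
        if hours < 12 then
          PySem.Int.toStr hours ++ ":" ++ pvPad2 minutes ++ " AM"
        else
          PySem.Int.toStr (if hours > 12 then hours - 12 else 12) ++ ":" ++ pvPad2 minutes ++ " PM"
      match st.1 with
      | some prev => (some current, st.2 ++ [prev ++ " - " ++ current])
      | none => (some current, st.2)) ((none : Option String), ([] : List String))).2

-- ===== PRECONDITION & SPEC =====
def Spec_generate_time_ranges (time_slots : List Int) (out : List String) : Prop := out = generate_time_ranges_alt time_slots
instance (time_slots : List Int) (out : List String) : Decidable (Spec_generate_time_ranges time_slots out) := by unfold Spec_generate_time_ranges; infer_instance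

-- ===== CLAIM (what is proved, stated in full; the proofs are below) =====
def Claim_equal_generate_time_ranges : Prop := ∀ (time_slots : List Int), Dom_generate_time_ranges time_slots → Spec_generate_time_ranges time_slots (generate_time_ranges time_slots)

-- ===== LEMMAS AND PROOFS =====

-- the formatting expression both Pythons share, as one proof-side function
def pvFmt (time : Int) : String :=
  let hours := PySem.Int.floordiv time 100
  let minutes := PySem.Int.mod time 100
  if hours < 12 then
    PySem.Int.toStr hours ++ ":" ++ pvPad2 minutes ++ " AM"
  else
    PySem.Int.toStr (if hours > 12 then hours - 12 else 12) ++ ":" ++ pvPad2 minutes ++ " PM"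

-- adjacent pairs "a - b" of a list
def pvPairs : List String → List String
  | a :: b :: t => (a ++ " - " ++ b) :: pvPairs (b :: t)
  | _ => []

theorem tfcsr_eq_map (ts : List Int) :
    timeframecreatorstorageregular ts = ts.map pvFmt := by
  show ts.foldl (fun acc t => acc ++ [pvFmt t]) [] = ts.map pvFmt
  simpa using PySem.List.foldl_append_singleton_eq_map (l := ts) (f := pvFmt) (acc := [])

theorem range_map_pairs (d : String) (rs : List String) :
    (List.range (rs.length - 1)).map
      (fun k => rs.getD k d ++ " - " ++ rs.getD (k + 1) d) = pvPairs rs := by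
  induction rs with
  | nil => simp [pvPairs]
  | cons a t ih =>
    match t with
    | [] => simp [pvPairs]
    | b :: t' =>
      have h := ih
      simp only [List.length_cons, Nat.add_sub_cancel] at h ⊢
      rw [List.range_succ_eq_map, List.map_cons, List.map_map]
      simp only [Function.comp_def, List.getD_cons_succ, List.getD_cons_zero]
      simp only [List.getD_cons_succ] at h
      exact congrArg _ h

theorem portA_eq_pairs (ts : List Int) :
    generate_time_ranges ts = pvPairs (ts.map pvFmt) := by
  unfold generate_time_ranges
  rw [tfcsr_eq_map]
  set rs := ts.map pvFmt with hrs
  rw [PySem.List.foldl_append_singleton_eq_map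
    (l := PySem.List.pyRange 0 ((rs.length : Int) - 1) 1)
    (f := fun i => PySem.List.pyGetD rs i "" ++ " - " ++ PySem.List.pyGetD rs (i + 1) "")
    (acc := [])]
  rw [PySem.List.pyRange_one, List.map_map]
  have hcast : ((rs.length : Int) - 1 - 0).toNat = rs.length - 1 := by omega
  rw [hcast]
  refine (List.map_congr_left ?_).trans (range_map_pairs "" rs)
  intro k _
  simp only [Function.comp_apply, zero_add]
  rw [show ((k : Int) + 1) = ((k + 1 : Nat) : Int) by push_cast; ring,
    PySem.List.pyGetD_natCast, PySem.List.pyGetD_natCast]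

theorem portB_inv (xs : List Int) : ∀ (p : String) (acc : List String),
    (xs.foldl (fun (st : Option String × List String) time =>
      let current := pvFmt time
      match st.1 with
      | some prev => (some current, st.2 ++ [prev ++ " - " ++ current])
      | none => (some current, st.2)) (some p, acc)).2
    = acc ++ pvPairs (p :: xs.map pvFmt) := by
  induction xs with
  | nil => intro p acc; simp [pvPairs]
  | cons x t ih =>
    intro p acc
    simp only [List.foldl_cons, List.map_cons]
    rw [show pvPairs (p :: pvFmt x :: t.map pvFmt)
        = (p ++ " - " ++ pvFmt x) :: pvPairs (pvFmt x :: t.map pvFmt) from rfl]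
    simpa using ih (pvFmt x) (acc ++ [p ++ " - " ++ pvFmt x])

theorem portB_eq_pairs (ts : List Int) :
    generate_time_ranges_alt ts = pvPairs (ts.map pvFmt) := by
  cases ts with
  | nil => rfl
  | cons t t' =>
    show (t'.foldl (fun (st : Option String × List String) time =>
      let current := pvFmt time
      match st.1 with
      | some prev => (some current, st.2 ++ [prev ++ " - " ++ current])
      | none => (some current, st.2)) (some (pvFmt t), [])).2
      = pvPairs ((t :: t').map pvFmt)
    simpa using portB_inv t' (pvFmt t) []

-- ===== VERDICT (by name: the statement is the Claim_ definition above) =====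
theorem generate_time_ranges_spec : Claim_equal_generate_time_ranges := by
  intro ts _
  unfold Spec_generate_time_ranges
  rw [portA_eq_pairs, portB_eq_pairs]
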